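-- pv_equiv track=rewrite | github.com/PeterKADam/Bioinformatics | Project-Lars/Eksamensopgaver/2017/progexam.py | self_comparison
-- ===== SOURCE A (Python) =====
-- def self_comparison(seq):
--     matrix = []
--     for every in range(len(seq)):
--         matrix.append([None] * len(seq))
--
--     for i in range(len(seq)):
--         for j in range(len(seq)):
--             if seq[i] == seq[j]:
--                 matrix[i][j] = 1
--             else:
--                 matrix[i][j] = 0
--     return matrix
-- ===== SOURCE B (Python) =====
-- def self_comparison(seq):
--     # Row i depends only on the character seq[i]: compute each distinct
--     # character's row once and share it across all its occurrences.
--     rows = {}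
--     for c in seq:
--         if c not in rows:
--             rows[c] = [1 if c == d else 0 for d in seq]
--     return [rows[c] for c in seq]
-- ===== Notes on version B (the rewrite author's own statement) =====
-- stated objective: faster
-- what changed: Instead of filling every cell with a nested index loop, B memoizes one equality row per distinct character in a dict and assembles the matrix by looking each character's row up, so the pairwise comparison work is O(d*n) for d distinct characters.
import Mathlib
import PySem

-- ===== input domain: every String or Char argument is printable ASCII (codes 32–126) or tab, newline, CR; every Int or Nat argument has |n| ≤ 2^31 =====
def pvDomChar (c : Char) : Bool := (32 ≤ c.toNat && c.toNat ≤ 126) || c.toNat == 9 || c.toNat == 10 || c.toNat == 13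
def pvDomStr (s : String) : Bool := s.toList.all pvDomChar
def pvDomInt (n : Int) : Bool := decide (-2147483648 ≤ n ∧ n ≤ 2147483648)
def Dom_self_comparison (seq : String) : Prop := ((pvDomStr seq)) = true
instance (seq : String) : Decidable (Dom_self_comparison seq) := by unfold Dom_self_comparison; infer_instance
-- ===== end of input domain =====

-- B memoizes one equality row per distinct character (dict lookup) instead of A's full n×n
-- index loop: faster by skipping repeated comparisons; B's output rows are shared list objects in Python.


-- ===== PORT A =====
-- Literal port of A: build the matrix of None placeholders (Option Int), then the nested
-- index loops overwrite every cell; the final `.map (·.getD 0)` only converts the Option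
-- layer of the placeholders (all cells are `some` by then) back to Int, as A's return type has.
-- Indices i, j range over [0, len(seq)), so `s.getD i ' '` is exactly Python's `seq[i]` here.
def self_comparison (seq : String) : List (List Int) :=
  let s := seq.toList
  let n := s.length
  let matrix0 : List (List (Option Int)) :=
    (List.range n).foldl (fun m _ => m ++ [List.replicate n (none : Option Int)]) []
  let matrix : List (List (Option Int)) :=
    (List.range n).foldl (fun m i =>
      (List.range n).foldl (fun m j =>
        m.set i ((m[i]?.getD []).set j
          (if s.getD i ' ' = s.getD j ' ' then some 1 else some 0))) m) matrix0
  matrix.map (fun row => row.map (fun o => o.getD 0))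

-- ===== PORT B =====
def self_comparison_alt (seq : String) : List (List Int) :=
  let s := seq.toList
  let rows : PySem.Dict Char (List Int) :=
    s.foldl (fun d c =>
      if d.contains c then d
      else d.insert c (s.map (fun x => if c = x then (1 : Int) else 0))) PySem.Dict.empty
  s.map (fun c => (rows.get? c).getD [])

-- ===== PRECONDITION & SPEC =====
def Spec_self_comparison (seq : String) (out : List (List Int)) : Prop := out = self_comparison_alt seq
instance (seq : String) (out : List (List Int)) : Decidable (Spec_self_comparison seq out) := by unfold Spec_self_comparison; infer_instance

-- ===== CLAIM (what is proved, stated in full; the proofs are below) =====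
def Claim_equal_self_comparison : Prop := ∀ (seq : String), Dom_self_comparison seq → Spec_self_comparison seq (self_comparison seq)

-- ===== LEMMAS AND PROOFS =====

/-- The canonical row for character `c`: its equality pattern against `s`. -/
def pvRow (s : List Char) (c : Char) : List Int := s.map (fun x => if c = x then (1 : Int) else 0)

-- ---- generic facts about loops of `set` ----

theorem pv_len_foldl_set {α : Type} (g : Nat → α) (js : List Nat) (r : List α) :
    (js.foldl (fun r j => r.set j (g j)) r).length = r.length := by
  induction js generalizing r with
  | nil => rfl
  | cons j js ih => simp [List.foldl_cons, ih, List.length_set]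

theorem pv_get_foldl_set_not_mem {α : Type} (g : Nat → α) (js : List Nat) (r : List α)
    (k : Nat) (hk : k ∉ js) :
    (js.foldl (fun r j => r.set j (g j)) r)[k]? = r[k]? := by
  induction js generalizing r with
  | nil => rfl
  | cons j js ih =>
      simp only [List.mem_cons, not_or] at hk
      rw [List.foldl_cons, ih _ hk.2, List.getElem?_set_ne (Ne.symm hk.1)]

theorem pv_get_foldl_set_mem {α : Type} (g : Nat → α) (js : List Nat) (r : List α)
    (k : Nat) (hk : k ∈ js) (hlt : k < r.length) :
    (js.foldl (fun r j => r.set j (g j)) r)[k]? = some (g k) := by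
  induction js generalizing r with
  | nil => cases hk
  | cons j js ih =>
      rw [List.foldl_cons]
      by_cases hmem : k ∈ js
      · exact ih _ hmem (by simpa using hlt)
      · have hkj : k = j := (List.mem_cons.mp hk).resolve_right hmem
        subst hkj
        rw [pv_get_foldl_set_not_mem _ _ _ _ hmem, List.getElem?_set_self hlt]

theorem pv_foldl_set_range {α : Type} (g : Nat → α) (n : Nat) (r : List α) (hr : r.length = n) :
    (List.range n).foldl (fun r j => r.set j (g j)) r = (List.range n).map g := by
  apply List.ext_getElem?
  intro k
  by_cases hk : k < n
  · rw [pv_get_foldl_set_mem g _ _ _ (List.mem_range.mpr hk) (by omega),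
      List.getElem?_map, List.getElem?_range hk]
    rfl
  · rw [List.getElem?_eq_none (by simpa [pv_len_foldl_set, hr] using Nat.le_of_not_lt hk),
      List.getElem?_eq_none (by simpa using Nat.le_of_not_lt hk)]

-- ---- A's inner loop only rewrites row i ----

theorem pv_inner_loop {α : Type} (g : Nat → α) (js : List Nat) (m : List (List α)) (i : Nat)
    (hi : i < m.length) :
    (js.foldl (fun m j => m.set i ((m[i]?.getD []).set j (g j))) m)
      = m.set i (js.foldl (fun r j => r.set j (g j)) (m[i]?.getD [])) := by
  induction js generalizing m with
  | nil =>
      simp only [List.foldl_nil]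
      rw [List.getElem?_eq_getElem hi]
      simp
  | cons j js ih =>
      rw [List.foldl_cons, List.foldl_cons, ih _ (by simpa using hi)]
      rw [List.getElem?_set_self hi]
      simp [List.set_set]

-- ---- A's init loop builds a replicate ----

theorem pv_init_loop {α : Type} (a : α) (l : List Nat) (m0 : List α) :
    (l.foldl (fun m _ => m ++ [a]) m0) = m0 ++ List.replicate l.length a := by
  induction l generalizing m0 with
  | nil => simp
  | cons x l ih =>
      rw [List.foldl_cons, ih, List.append_assoc]
      rfl

-- ---- A's outer loop, with the all-rows-length-n invariant ----

theorem pv_outer_loop (s : List Char) (is : List Nat) (m : List (List (Option Int)))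
    (hlen : m.length = s.length) (hrows : ∀ row ∈ m, row.length = s.length)
    (his : ∀ i ∈ is, i < s.length) :
    ∀ k, (is.foldl (fun m i =>
        (List.range s.length).foldl (fun m j =>
          m.set i ((m[i]?.getD []).set j
            (if s.getD i ' ' = s.getD j ' ' then some 1 else some 0))) m) m)[k]?
      = if k ∈ is then some ((List.range s.length).map
            (fun j => if s.getD k ' ' = s.getD j ' ' then some 1 else some 0))
        else m[k]? := by
  induction is generalizing m with
  | nil => intro k; simp
  | cons i is ih =>
      intro k
      have hi : i < m.length := hlen ▸ his i (List.mem_cons_self)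
      have hrowi : (m[i]?.getD []).length = s.length := by
        rw [List.getElem?_eq_getElem hi]
        exact hrows _ (List.getElem_mem hi)
      rw [List.foldl_cons, pv_inner_loop _ _ _ _ hi, pv_foldl_set_range _ _ _ hrowi]
      rw [ih _ (by simp [hlen]) _ (fun j hj => his j (List.mem_cons_of_mem _ hj))]
      · by_cases hmem : k ∈ is
        · simp [hmem, List.mem_cons]
        · by_cases hki : k = i
          · subst hki
            simp [hmem, List.getElem?_set_self (hlen ▸ his k List.mem_cons_self)]
          · simp [hmem, hki, List.getElem?_set_ne (Ne.symm hki)]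
      · intro row hrow
        rcases List.mem_or_eq_of_mem_set hrow with h | h
        · exact hrows _ h
        · simp [h]

theorem pv_A_core (s : List Char) :
    (((List.range s.length).foldl
        (fun m i => (List.range s.length).foldl
          (fun m j => m.set i ((m[i]?.getD []).set j
            (if s.getD i ' ' = s.getD j ' ' then some 1 else some 0))) m)
        ((List.range s.length).foldl
          (fun m _ => m ++ [List.replicate s.length (none : Option Int)]) [])).map
      (fun row => row.map (fun o => o.getD (0 : Int))))
      = s.map (fun c => pvRow s c) := by
  have hinit : (List.range s.length).foldl
      (fun m _ => m ++ [List.replicate s.length (none : Option Int)]) []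
      = List.replicate s.length (List.replicate s.length (none : Option Int)) := by
    rw [pv_init_loop]; simp
  rw [hinit]
  have houter := pv_outer_loop s (List.range s.length)
    (List.replicate s.length (List.replicate s.length (none : Option Int)))
    (by simp) (by intro row hrow; rw [List.eq_of_mem_replicate hrow]; simp)
    (by intro i hi; exact List.mem_range.mp hi)
  apply List.ext_getElem?
  intro k
  rw [List.getElem?_map, houter k]
  by_cases hk : k < s.length
  · rw [if_pos (List.mem_range.mpr hk), List.getElem?_map, List.getElem?_eq_getElem hk]
    simp only [Option.map_some]
    congr 1
    unfold pvRow
    apply List.ext_getElem?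
    intro j
    by_cases hj : j < s.length
    · rw [List.getElem?_map, List.getElem?_map, List.getElem?_range hj,
        List.getElem?_map, List.getElem?_eq_getElem hj]
      simp only [Option.map_some, List.getD_eq_getElem s ' ' hk]
      rw [List.getD_eq_getElem s ' ' hj]
      split_ifs <;> rfl
    · rw [List.getElem?_eq_none (by simpa using Nat.le_of_not_lt hj),
        List.getElem?_eq_none (by simpa using Nat.le_of_not_lt hj)]
  · rw [if_neg (by simpa using hk), List.getElem?_eq_none
        (by simpa using Nat.le_of_not_lt hk),
      List.getElem?_eq_none (by simpa using Nat.le_of_not_lt hk)]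
    rfl

/-- A computes the map-of-rows matrix. -/
theorem pv_A_eq (seq : String) :
    self_comparison seq = (seq.toList).map (fun c => pvRow seq.toList c) :=
  pv_A_core seq.toList

-- ---- B's dict: every stored value is the canonical row, and every seen char is stored ----

theorem pv_B_dict_sound (s : List Char) (l : List Char) (d : PySem.Dict Char (List Int))
    (hd : ∀ c v, d.get? c = some v → v = pvRow s c) :
    ∀ c v, (l.foldl (fun d c =>
        if d.contains c then d
        else d.insert c (s.map (fun x => if c = x then (1 : Int) else 0))) d).get? c = some v
      → v = pvRow s c := by
  induction l generalizing d with
  | nil => exact hd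
  | cons a l ih =>
      rw [List.foldl_cons]
      apply ih
      intro c v hcv
      by_cases hca : d.contains a
      · rw [if_pos hca] at hcv; exact hd c v hcv
      · rw [if_neg hca] at hcv
        by_cases hc : c = a
        · subst hc
          rw [PySem.Dict.get?_insert_self] at hcv
          cases hcv; rfl
        · rw [PySem.Dict.get?_insert_of_ne _ _ hc] at hcv
          exact hd c v hcv

theorem pv_B_dict_complete (s : List Char) (l : List Char) (d : PySem.Dict Char (List Int)) :
    ∀ c, (c ∈ l ∨ (d.get? c).isSome) →
      ((l.foldl (fun d c =>
        if d.contains c then d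
        else d.insert c (s.map (fun x => if c = x then (1 : Int) else 0))) d).get? c).isSome := by
  induction l generalizing d with
  | nil =>
      intro c hc
      rcases hc with h | h
      · cases h
      · exact h
  | cons a l ih =>
      intro c hc
      rw [List.foldl_cons]
      apply ih
      by_cases hca : d.contains a
      · rw [if_pos hca]
        rcases hc with h | h
        · rcases List.mem_cons.mp h with h | h
          · subst h
            right
            rw [← PySem.Dict.contains_eq_isSome_get?]; exact hca
          · exact Or.inl h
        · exact Or.inr h
      · rw [if_neg hca]
        rcases hc with h | h
        · rcases List.mem_cons.mp h with h | h
          · subst h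
            right
            rw [PySem.Dict.get?_insert_self]; rfl
          · exact Or.inl h
        · right
          by_cases hcae : c = a
          · subst hcae; rw [PySem.Dict.get?_insert_self]; rfl
          · rw [PySem.Dict.get?_insert_of_ne _ _ hcae]; exact h

/-- B computes the map-of-rows matrix. -/
theorem pv_B_eq (seq : String) :
    self_comparison_alt seq = (seq.toList).map (fun c => pvRow seq.toList c) := by
  unfold self_comparison_alt
  set s := seq.toList with hs
  apply List.map_congr_left
  intro c hc
  set rows := s.foldl (fun d c =>
      if d.contains c then d
      else d.insert c (s.map (fun x => if c = x then (1 : Int) else 0)))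
      PySem.Dict.empty with hrows
  have hsome : (rows.get? c).isSome :=
    pv_B_dict_complete s s PySem.Dict.empty c (Or.inl hc)
  obtain ⟨v, hv⟩ := Option.isSome_iff_exists.mp hsome
  have := pv_B_dict_sound s s PySem.Dict.empty (by simp [PySem.Dict.get?_empty]) c v hv
  rw [hv, this]
  rfl

-- ===== VERDICT (by name: the statement is the Claim_ definition above) =====
theorem self_comparison_spec : Claim_equal_self_comparison := by
  intro seq _
  unfold Spec_self_comparison
  rw [pv_A_eq, pv_B_eq]
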